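-- pv_equiv track=rewrite | github.com/rbf22/hvgs2seq | hgvs2seq/consequence/base.py | get_most_severe_consequence
-- ===== SOURCE A (Python) =====
-- from typing import Optional, Dict, Any, List
--
-- CONSEQUENCE_SEVERITY = [
--     'start_lost',
--     'stop_gained',
--     'frameshift_variant',
--     'stop_lost',
--     'inframe_deletion',
--     'inframe_insertion',
--     'missense_variant',
--     'synonymous_variant'
-- ]
--
-- def get_most_severe_consequence(results: List[str]) -> Optional[str]:
--     """Return the most severe consequence from a list of results.
--
--     Args:
--         results: List of consequence strings
--
--     Returns:
--         The most severe consequence, or None if the input list is empty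
--     """
--     if not results:
--         return None
--
--     # Find the consequence with the highest severity (lowest index in CONSEQUENCE_SEVERITY)
--     min_index = len(CONSEQUENCE_SEVERITY)
--     most_severe = None
--
--     for consequence in results:
--         try:
--             idx = CONSEQUENCE_SEVERITY.index(consequence)
--             if idx < min_index:
--                 min_index = idx
--                 most_severe = consequence
--         except ValueError:
--             # If the consequence is not in our severity list, keep the first one we found
--             if most_severe is None:
--                 most_severe = consequence
--
--     return most_severe
-- ===== SOURCE B (Python) =====
-- CONSEQUENCE_SEVERITY = [
--     'start_lost',
--     'stop_gained',
--     'frameshift_variant',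
--     'stop_lost',
--     'inframe_deletion',
--     'inframe_insertion',
--     'missense_variant',
--     'synonymous_variant'
-- ]
--
-- def get_most_severe_consequence(results):
--     """Return the most severe consequence from a list of results."""
--     if not results:
--         return None
--     present = set(results)
--     for name in CONSEQUENCE_SEVERITY:
--         if name in present:
--             return name
--     return results[0]
-- ===== Notes on version B (the rewrite author's own statement) =====
-- stated objective: faster
-- what changed: Instead of scanning the input maintaining a running minimum via list.index on the severity table for every element, B builds a set of the inputs once and walks the fixed severity table in order, returning the first entry present (first input element as all-unknown fallback).
import Mathlib
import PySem

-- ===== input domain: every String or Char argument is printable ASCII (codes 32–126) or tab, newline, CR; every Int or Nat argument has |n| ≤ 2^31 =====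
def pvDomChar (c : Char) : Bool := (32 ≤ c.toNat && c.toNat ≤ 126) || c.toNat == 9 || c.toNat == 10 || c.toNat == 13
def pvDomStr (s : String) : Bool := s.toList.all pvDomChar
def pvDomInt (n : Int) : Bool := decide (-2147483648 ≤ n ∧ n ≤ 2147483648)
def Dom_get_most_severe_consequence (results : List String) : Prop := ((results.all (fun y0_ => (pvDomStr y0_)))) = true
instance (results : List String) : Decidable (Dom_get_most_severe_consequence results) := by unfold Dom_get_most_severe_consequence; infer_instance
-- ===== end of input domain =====

-- B replaces A's input scan with a running minimum by a single walk of the fixed severity table,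
-- returning the first entry present in a set of the inputs (objective: faster, measured).


-- module constant CONSEQUENCE_SEVERITY (shared context of both programs)
def pvSEV : List String :=
  ["start_lost", "stop_gained", "frameshift_variant", "stop_lost",
   "inframe_deletion", "inframe_insertion", "missense_variant", "synonymous_variant"]

-- ===== PORT A =====
-- A's loop state: (min_index, most_severe); the try/except is the case split on index?.
def pvStepA (st : Nat × Option String) (c : String) : Nat × Option String :=
  match PySem.List.index? pvSEV c with
  | some idx => if idx < st.1 then (idx, some c) else st
  | none => match st.2 with
            | none => (st.1, some c)
            | some _ => st

def get_most_severe_consequence (results : List String) : Option String :=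
  if results = [] then none
  else (results.foldl pvStepA (pvSEV.length, none)).2

-- ===== PORT B =====
-- B: build set(results) once, walk the severity table in order, return the first entry present;
-- fall back to results[0] when no table entry is in the set. The early-returning for-loop is List.find?.
def get_most_severe_consequence_alt (results : List String) : Option String :=
  match results with
  | [] => none
  | r :: _ =>
    let present : PySem.Set String := PySem.Set.ofList results
    match pvSEV.find? (fun name => PySem.Set.contains present name) with
    | some name => some name
    | none => some r

-- ===== PRECONDITION & SPEC =====
def Spec_get_most_severe_consequence (results : List String) (out : Option String) : Prop := out = get_most_severe_consequence_alt results
instance (results : List String) (out : Option String) : Decidable (Spec_get_most_severe_consequence results out) := by unfold Spec_get_most_severe_consequence; infer_instance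

-- ===== CLAIM (what is proved, stated in full; the proofs are below) =====
def Claim_equal_get_most_severe_consequence : Prop := ∀ (results : List String), Dom_get_most_severe_consequence results → Spec_get_most_severe_consequence results (get_most_severe_consequence results)

-- ===== LEMMAS AND PROOFS =====

-- severity index of a member of pvSEV
def pvKey (c : String) : Nat := (PySem.List.index? pvSEV c).getD 0

-- the running minimum of A, expressed over the filtered list
def pvM (l : List String) : Nat :=
  (l.filter (fun c => pvSEV.contains c)).foldl (fun m c => min m (pvKey c)) pvSEV.length

-- the abstract value of A's loop output
def pvO (l : List String) : Option String :=
  match l with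
  | [] => none
  | x :: _ =>
    if l.filter (fun c => pvSEV.contains c) = [] then some x
    else some (pvSEV.getD (pvM l) "")

lemma pvO_cons (x : String) (r : List String) :
    pvO (x :: r) =
      if (x :: r).filter (fun c => pvSEV.contains c) = [] then some x
      else some (pvSEV.getD (pvM (x :: r)) "") := rfl

lemma pv_contains_true {c : String} (hc : c ∈ pvSEV) : pvSEV.contains c = true := by
  simpa using hc

lemma pv_filter_append_mem (t : List String) {c : String} (hc : c ∈ pvSEV) :
    (t ++ [c]).filter (fun x => pvSEV.contains x) = t.filter (fun x => pvSEV.contains x) ++ [c] := by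
  rw [List.filter_append]
  simp only [List.filter_cons, List.filter_nil, pv_contains_true hc, if_true]

lemma pv_filter_append_not_mem (t : List String) {c : String} (hc : c ∉ pvSEV) :
    (t ++ [c]).filter (fun x => pvSEV.contains x) = t.filter (fun x => pvSEV.contains x) := by
  rw [List.filter_append]
  simp [hc]

lemma pv_key_lt (c : String) (h : c ∈ pvSEV) : pvKey c < 8 := by
  simp only [pvSEV, List.mem_cons, List.not_mem_nil, or_false] at h
  rcases h with rfl|rfl|rfl|rfl|rfl|rfl|rfl|rfl <;> decide

lemma pv_getD_key (c : String) (h : c ∈ pvSEV) : pvSEV.getD (pvKey c) "" = c := by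
  simp only [pvSEV, List.mem_cons, List.not_mem_nil, or_false] at h
  rcases h with rfl|rfl|rfl|rfl|rfl|rfl|rfl|rfl <;> decide

lemma pv_key_getD : ∀ j < 8, pvKey (pvSEV.getD j "") = j := by decide

lemma pv_foldl_min_le_init (f : String → Nat) (ks : List String) (a : Nat) :
    ks.foldl (fun m c => min m (f c)) a ≤ a := by
  induction ks generalizing a with
  | nil => simp
  | cons x t ih => exact le_trans (ih (min a (f x))) (Nat.min_le_left _ _)

lemma pv_foldl_min_le_mem (f : String → Nat) (ks : List String) (a : Nat)
    (y : String) (hy : y ∈ ks) : ks.foldl (fun m c => min m (f c)) a ≤ f y := by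
  induction ks generalizing a with
  | nil => simp at hy
  | cons x t ih =>
    rw [List.foldl_cons]
    rcases List.mem_cons.mp hy with rfl | hy'
    · exact le_trans (pv_foldl_min_le_init f t _) (Nat.min_le_right _ _)
    · exact ih _ hy'

lemma pv_foldl_min_attained (f : String → Nat) (ks : List String) (a : Nat) :
    ks.foldl (fun m c => min m (f c)) a = a ∨
      ∃ y ∈ ks, ks.foldl (fun m c => min m (f c)) a = f y := by
  induction ks generalizing a with
  | nil => exact Or.inl rfl
  | cons x t ih =>
    rcases ih (min a (f x)) with h | ⟨y, hy, h⟩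
    · rcases Nat.le_total a (f x) with hle | hle
      · exact Or.inl (by simpa [Nat.min_eq_left hle] using h)
      · exact Or.inr ⟨x, List.mem_cons_self, by simpa [Nat.min_eq_right hle] using h⟩
    · exact Or.inr ⟨y, List.mem_cons_of_mem _ hy, h⟩

lemma pv_mem_of_mem_filter {y : String} {l : List String}
    (hy : y ∈ l.filter (fun c => pvSEV.contains c)) : y ∈ pvSEV := by
  have := (List.mem_filter.mp hy).2
  simpa using this

lemma pv_M_le (l : List String) (y : String)
    (hy : y ∈ l.filter (fun c => pvSEV.contains c)) : pvM l ≤ pvKey y :=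
  pv_foldl_min_le_mem _ _ _ _ hy

lemma pv_M_eq_len_of_nil (l : List String)
    (h : l.filter (fun c => pvSEV.contains c) = []) : pvM l = 8 := by
  unfold pvM; rw [h]; rfl

-- when some known consequence exists, the running minimum is attained
lemma pv_M_attained (l : List String)
    (h : l.filter (fun c => pvSEV.contains c) ≠ []) :
    ∃ y ∈ l.filter (fun c => pvSEV.contains c), pvKey y = pvM l := by
  rcases pv_foldl_min_attained pvKey (l.filter (fun c => pvSEV.contains c)) pvSEV.length
    with h8 | ⟨y, hy, hv⟩
  · exfalso
    rcases List.exists_mem_of_ne_nil _ h with ⟨y, hy⟩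
    have h1 := pv_M_le l y hy
    have h2 : pvKey y < 8 := pv_key_lt y (pv_mem_of_mem_filter hy)
    have h8' : pvM l = 8 := h8
    omega
  · exact ⟨y, hy, hv.symm⟩

lemma pv_getD_M_mem (l : List String)
    (h : l.filter (fun c => pvSEV.contains c) ≠ []) :
    pvSEV.getD (pvM l) "" ∈ l.filter (fun c => pvSEV.contains c) ∧
      pvKey (pvSEV.getD (pvM l) "") = pvM l := by
  rcases pv_M_attained l h with ⟨y, hy, hv⟩
  have hg : pvSEV.getD (pvM l) "" = y := by
    rw [← hv]; exact pv_getD_key y (pv_mem_of_mem_filter hy)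
  rw [hg]; exact ⟨hy, hv⟩

-- A's loop, characterized over the whole input list (right-to-left induction)
lemma pv_charA (l : List String) :
    l.foldl pvStepA (pvSEV.length, none) = (pvM l, pvO l) := by
  induction l using List.reverseRecOn with
  | nil => rfl
  | append_singleton t c ih =>
    rw [List.foldl_append, ih, List.foldl_cons, List.foldl_nil]
    by_cases hc : c ∈ pvSEV
    · -- c is a known consequence
      obtain ⟨k, hk⟩ := Option.isSome_iff_exists.mp
        ((PySem.List.index?_isSome_iff (xs := pvSEV) (v := c)).mpr hc)
      have hkeyk : pvKey c = k := by simp only [pvKey]; rw [hk]; rfl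
      have hfilt := pv_filter_append_mem t hc
      have hM : pvM (t ++ [c]) = min (pvM t) (pvKey c) := by
        unfold pvM; rw [hfilt, List.foldl_append, List.foldl_cons, List.foldl_nil]
      have hne : (t ++ [c]).filter (fun x => pvSEV.contains x) ≠ [] := by
        rw [hfilt]; exact List.append_ne_nil_of_right_ne_nil _ (by simp)
      simp only [pvStepA, hk]
      by_cases hlt : k < pvM t
      · -- new minimum: state becomes (k, some c)
        rw [if_pos hlt]
        have hMv : pvM (t ++ [c]) = k := by rw [hM, hkeyk]; omega
        have hO : pvO (t ++ [c]) = some c := by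
          rcases t with _ | ⟨x, r⟩
          · rw [List.nil_append] at hMv hne
            rw [List.nil_append, pvO_cons, if_neg hne, hMv, ← hkeyk, pv_getD_key c hc]
          · rw [List.cons_append] at hne hMv ⊢
            rw [pvO_cons, if_neg hne, hMv, ← hkeyk, pv_getD_key c hc]
        rw [hMv, hO]
      · -- minimum unchanged; t already has a known consequence
        rw [if_neg hlt]
        have htne : t.filter (fun x => pvSEV.contains x) ≠ [] := by
          intro h0
          have := pv_M_eq_len_of_nil t h0
          have := pv_key_lt c hc
          omega
        have hMv : pvM (t ++ [c]) = pvM t := by rw [hM, hkeyk]; omega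
        rcases t with _ | ⟨x, r⟩
        · exact absurd rfl htne
        · have hO : pvO ((x :: r) ++ [c]) = pvO (x :: r) := by
            rw [List.cons_append] at hne hMv hfilt ⊢
            rw [pvO_cons, pvO_cons, if_neg hne, if_neg htne, hMv]
          rw [hMv, hO]
    · -- c is unknown
      have hidx : PySem.List.index? pvSEV c = none :=
        (PySem.List.index?_eq_none_iff (xs := pvSEV) (v := c)).mpr hc
      have hfilt := pv_filter_append_not_mem t hc
      have hM : pvM (t ++ [c]) = pvM t := by unfold pvM; rw [hfilt]
      simp only [pvStepA, hidx]
      rcases t with _ | ⟨x, r⟩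
      · -- t empty: most_severe was None, becomes c
        have hfe : ([c] : List String).filter (fun x => pvSEV.contains x) = [] := by
          simpa using hfilt
        rw [List.nil_append] at hM ⊢
        show (pvM [], some c) = (pvM [c], pvO [c])
        rw [hM, pvO_cons, if_pos hfe]
      · -- t nonempty: pvO t is some _, state unchanged
        rw [List.cons_append] at hM hfilt ⊢
        rw [pvO_cons]
        have hO : pvO (x :: (r ++ [c])) = pvO (x :: r) := by
          rw [pvO_cons, pvO_cons, hfilt, hM]
        rw [hO, pvO_cons]
        by_cases hf : (x :: r).filter (fun c => pvSEV.contains c) = []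
        · rw [if_pos hf, hM]
        · rw [if_neg hf, hM]

-- membership in set(results) is membership in results
lemma pv_present (l : List String) (x : String) :
    PySem.Set.contains (PySem.Set.ofList l) x = true ↔ x ∈ l := by
  rw [PySem.Set.contains_iff]
  exact PySem.Set.mem_ofList (α := String) (xs := l) (y := x)

-- B's table walk finds nothing exactly when no result is a known consequence
lemma pv_find?_none (l : List String)
    (h : l.filter (fun c => pvSEV.contains c) = []) :
    pvSEV.find? (fun name => PySem.Set.contains (PySem.Set.ofList l) name) = none := by
  apply List.find?_eq_none.mpr
  intro x hx hpx
  have hxl : x ∈ l := (pv_present l x).mp hpx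
  have : x ∈ l.filter (fun c => pvSEV.contains c) :=
    List.mem_filter.mpr ⟨hxl, pv_contains_true hx⟩
  rw [h] at this
  exact absurd this (List.not_mem_nil)

-- B's table walk returns exactly pvSEV[pvM l] when a known consequence exists
lemma pv_find?_some (l : List String)
    (h : l.filter (fun c => pvSEV.contains c) ≠ []) :
    pvSEV.find? (fun name => PySem.Set.contains (PySem.Set.ofList l) name)
      = some (pvSEV.getD (pvM l) "") := by
  obtain ⟨hmem, hkey⟩ := pv_getD_M_mem l h
  have hM8 : pvM l < 8 := by
    have := pv_key_lt _ (pv_mem_of_mem_filter hmem); omega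
  have hMlen : pvM l < pvSEV.length := by simpa [pvSEV] using hM8
  apply List.find?_eq_some_iff_getElem.mpr
  refine ⟨(pv_present l _).mpr (List.mem_filter.mp hmem).1, pvM l, hMlen, ?_, ?_⟩
  · exact (List.getD_eq_getElem pvSEV "" hMlen).symm
  · intro j hj
    simp only [Bool.not_eq_eq_eq_not, Bool.not_true]
    by_contra hpj
    have hpj' : PySem.Set.contains (PySem.Set.ofList l) pvSEV[j] = true := by
      revert hpj; cases PySem.Set.contains (PySem.Set.ofList l) pvSEV[j] <;> simp
    have hjl : pvSEV[j] ∈ l := (pv_present l _).mp hpj'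
    have hjf : pvSEV[j] ∈ l.filter (fun c => pvSEV.contains c) :=
      List.mem_filter.mpr ⟨hjl, pv_contains_true (List.getElem_mem _)⟩
    have hle := pv_M_le l _ hjf
    have hkj : pvKey pvSEV[j] = j := by
      have := pv_key_getD j (by omega)
      rwa [List.getD_eq_getElem pvSEV "" (by omega)] at this
    omega

-- ===== VERDICT (by name: the statement is the Claim_ definition above) =====
theorem get_most_severe_consequence_spec : Claim_equal_get_most_severe_consequence := by
  intro results _
  unfold Spec_get_most_severe_consequence get_most_severe_consequence get_most_severe_consequence_alt
  rcases results with _ | ⟨r, rest⟩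
  · rfl
  · rw [if_neg (List.cons_ne_nil r rest), pv_charA]
    show pvO (r :: rest) =
      (match pvSEV.find? (fun name => PySem.Set.contains (PySem.Set.ofList (r :: rest)) name) with
       | some name => some name
       | none => some r)
    rw [pvO_cons]
    by_cases hf : (r :: rest).filter (fun c => pvSEV.contains c) = []
    · rw [if_pos hf, pv_find?_none _ hf]
    · rw [if_neg hf, pv_find?_some _ hf]
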